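-- pv_equiv track=rewrite | github.com/AngeloSouza1/DesafiosOBC | enigmamago/main.py | reconstruir_sequencia
-- ===== SOURCE A (Python) =====
-- from collections import Counter
--
-- def reconstruir_sequencia(viagem):
--     # Verificar se a lista está vazia
--     if not viagem:
--         return []
--
--     # Contar ocorrências de cada número na entrada
--     contador = Counter(viagem)
--
--     # Criar um dicionário que relaciona cada número ao seu invertido
--     mapa_inverso = {num: num[::-1] for num in viagem}
--
--     # Encontrar o menor número lexicograficamente para iniciar a sequência
--     inicio = min(viagem)
--
--     # Ordenar a sequência corretamente
--     sequencia_ordenada = [inicio]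
--     usados = Counter([inicio])
--
--     while sum(usados.values()) < len(viagem):
--         ultimo = sequencia_ordenada[-1]
--         proximo = mapa_inverso.get(ultimo)
--
--         if proximo and usados[proximo] < contador[proximo]:
--             sequencia_ordenada.append(proximo)
--             usados[proximo] += 1
--         else:
--             # Se não encontrar mais conexões, procura outro ponto de conexão
--             candidatos = [num for num in sorted(viagem) if usados[num] < contador[num]]
--             if candidatos:
--                 sequencia_ordenada.append(candidatos[0])
--                 usados[candidatos[0]] += 1
--             else:
--                 # Nenhum candidato encontrado, sair para evitar loop infinito
--                 break
--
--     return sequencia_ordenada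
-- ===== SOURCE B (Python) =====
-- from collections import deque
--
-- def reconstruir_sequencia(viagem):
--     if not viagem:
--         return []
--     # multiset of still-unplaced numbers
--     remaining = {}
--     for x in viagem:
--         remaining[x] = remaining.get(x, 0) + 1
--     # distinct values sorted once; exhausted ones are dropped from the front
--     disponiveis = deque(sorted(remaining))
--     cur = disponiveis[0]
--     remaining[cur] -= 1
--     resultado = [cur]
--     for _ in range(len(viagem) - 1):
--         nxt = cur[::-1]
--         if nxt and remaining.get(nxt, 0) > 0:
--             cur = nxt
--         else:
--             while remaining[disponiveis[0]] == 0: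
--                 disponiveis.popleft()
--             cur = disponiveis[0]
--         remaining[cur] -= 1
--         resultado.append(cur)
--     return resultado
-- ===== Notes on version B (the rewrite author's own statement) =====
-- stated objective: faster
-- what changed: B replaces A's per-step re-sort-and-filter fallback (sorted(viagem) plus a full filtering pass inside the while loop) by a single multiset count, one sort of the distinct values, and a monotone pointer (deque popleft) that skips exhausted values, so each greedy step costs O(1) amortised.
import Mathlib
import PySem

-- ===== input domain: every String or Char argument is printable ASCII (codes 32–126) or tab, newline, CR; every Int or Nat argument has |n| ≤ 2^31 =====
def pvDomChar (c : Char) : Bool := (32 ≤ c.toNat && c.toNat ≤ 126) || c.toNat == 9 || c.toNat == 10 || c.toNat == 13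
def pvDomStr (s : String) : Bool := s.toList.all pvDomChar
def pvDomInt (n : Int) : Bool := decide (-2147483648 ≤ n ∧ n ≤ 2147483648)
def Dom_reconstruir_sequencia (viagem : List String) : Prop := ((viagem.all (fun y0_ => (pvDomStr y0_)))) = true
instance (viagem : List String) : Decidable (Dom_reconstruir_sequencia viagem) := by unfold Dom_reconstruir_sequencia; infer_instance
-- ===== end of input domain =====

-- B replaces A's per-step sort-and-filter fallback with one sort of the distinct values and a
-- monotone front pointer over it (objective: faster; measured asymptotically faster).

-- shared helper: Python's s[::-1]
def pyRev (s : String) : String := (PySem.Str.slice? s none none (-1)).getD s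

-- ===== PORT A =====
-- the while loop of A; fuel bounds the iterations (each appends one element or returns)
def aLoop (viagem : List String) (contador : PySem.Dict String Int)
    (mapa : PySem.Dict String String)
    (seq : List String) (usados : PySem.Dict String Int) : Nat → List String
  | 0 => seq
  | fuel + 1 =>
    if usados.values.sum < (viagem.length : Int) then
      match PySem.List.pyGet? seq (-1) with
      | none => seq   -- unreachable: seq is never empty
      | some ultimo =>
        match mapa.get? ultimo with
        | some proximo =>
          if proximo ≠ "" ∧ usados.getD proximo 0 < contador.getD proximo 0 then
            aLoop viagem contador mapa (seq ++ [proximo]) (usados.modify proximo 0 (· + 1)) fuel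
          else
            match (PySem.List.sorted viagem (fun x => x)).filter
                (fun num => decide (usados.getD num 0 < contador.getD num 0)) with
            | [] => seq
            | c :: _ => aLoop viagem contador mapa (seq ++ [c]) (usados.modify c 0 (· + 1)) fuel
        | none =>
          match (PySem.List.sorted viagem (fun x => x)).filter
              (fun num => decide (usados.getD num 0 < contador.getD num 0)) with
          | [] => seq
          | c :: _ => aLoop viagem contador mapa (seq ++ [c]) (usados.modify c 0 (· + 1)) fuel
    else seq

def reconstruir_sequencia (viagem : List String) : List String :=
  if viagem = [] then []
  else
    let contador := PySem.Dict.counter viagem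
    let mapa := viagem.foldl (fun d num => d.insert num (pyRev num)) PySem.Dict.empty
    match PySem.List.min? viagem (fun x => x) with
    | none => []   -- unreachable: viagem ≠ []
    | some inicio =>
      aLoop viagem contador mapa [inicio] (PySem.Dict.counter [inicio]) viagem.length

-- ===== PORT B =====
-- the for loop of B; `disp` is the not-yet-exhausted tail of the sorted distinct values
def bLoop (remaining : PySem.Dict String Int) (disp : List String)
    (cur : String) (resultado : List String) : Nat → List String
  | 0 => resultado
  | n + 1 =>
    let nxt := pyRev cur
    if nxt ≠ "" ∧ 0 < remaining.getD nxt 0 then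
      bLoop (remaining.modify nxt 0 (· - 1)) disp nxt (resultado ++ [nxt]) n
    else
      match disp.dropWhile (fun x => remaining.getD x 0 == 0) with
      | [] => resultado   -- unreachable (Python would raise IndexError); total guard
      | c :: rest =>
        bLoop (remaining.modify c 0 (· - 1)) (c :: rest) c (resultado ++ [c]) n

def reconstruir_sequencia_alt (viagem : List String) : List String :=
  if viagem = [] then []
  else
    let remaining := viagem.foldl (fun d x => d.insert x (d.getD x 0 + 1)) PySem.Dict.empty
    match PySem.List.sorted remaining.keys (fun x => x) with
    | [] => []   -- unreachable: viagem ≠ []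
    | c :: rest =>
      bLoop (remaining.modify c 0 (· - 1)) (c :: rest) c [c] (viagem.length - 1)

-- ===== PRECONDITION & SPEC =====
def Spec_reconstruir_sequencia (viagem : List String) (out : List String) : Prop := out = reconstruir_sequencia_alt viagem
instance (viagem : List String) (out : List String) : Decidable (Spec_reconstruir_sequencia viagem out) := by unfold Spec_reconstruir_sequencia; infer_instance

-- ===== CLAIM (what is proved, stated in full; the proofs are below) =====
def Claim_equal_reconstruir_sequencia : Prop := ∀ (viagem : List String), Dom_reconstruir_sequencia viagem → Spec_reconstruir_sequencia viagem (reconstruir_sequencia viagem)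

-- ===== LEMMAS AND PROOFS =====

-- abbreviation used only by the proofs: the sorted distinct values
def sKeys (V : List String) : List String :=
  PySem.List.sorted (PySem.Set.ofList V) (fun x => x)

def mapaOf (V : List String) : PySem.Dict String String :=
  V.foldl (fun d num => d.insert num (pyRev num)) PySem.Dict.empty

lemma get?_mapaOf_aux (l : List String) (x : String) :
    ∀ d : PySem.Dict String String,
      (l.foldl (fun d a => d.insert a (pyRev a)) d).get? x
        = if x ∈ l then some (pyRev x) else d.get? x := by
  induction l with
  | nil => intro d; simp
  | cons a t ih =>
    intro d
    rw [List.foldl_cons, ih]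
    by_cases hx : x ∈ t
    · simp [hx]
    · by_cases hxa : x = a
      · subst hxa; simp [hx, PySem.Dict.get?_insert_self]
      · simp [hx, hxa, PySem.Dict.get?_insert_of_ne _ _ hxa]

lemma get?_mapaOf (V : List String) (x : String) (hx : x ∈ V) :
    (mapaOf V).get? x = some (pyRev x) := by
  rw [mapaOf, get?_mapaOf_aux, if_pos hx]

lemma sum_map_update (c : String) (f g : String → Int) (d : Int) (hgc : g c = f c + d) :
    ∀ l : List String, l.Nodup → c ∈ l → (∀ x ∈ l, x ≠ c → g x = f x) →
      (l.map g).sum = (l.map f).sum + d := by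
  intro l
  induction l with
  | nil => intro _ hc; cases hc
  | cons a t ih =>
    intro hl hc hg
    rw [List.nodup_cons] at hl
    rcases List.mem_cons.mp hc with h | h
    · subst h
      have ht : t.map g = t.map f :=
        List.map_congr_left fun x hx => hg x (List.mem_cons_of_mem _ hx) (fun he => hl.1 (he ▸ hx))
      simp only [List.map_cons, List.sum_cons, hgc, ht]; ring
    · have ha : a ≠ c := fun he => hl.1 (he ▸ h)
      simp only [List.map_cons, List.sum_cons]
      rw [hg a (by simp) ha, ih hl.2 h (fun x hx hxc => hg x (List.mem_cons_of_mem _ hx) hxc)]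
      ring

lemma head?_filter_eq_dropWhile (p : String → Bool) :
    ∀ l : List String, (l.filter p).head? = (l.dropWhile (fun x => !p x)).head? := by
  intro l
  induction l with
  | nil => rfl
  | cons a t ih =>
    by_cases h : p a
    · simp [h]
    · simp [h, ih]

lemma head?_filter_min (p : String → Bool) :
    ∀ l : List String, l.Pairwise (· ≤ ·) → ∀ m, (l.filter p).head? = some m →
      m ∈ l ∧ p m = true ∧ ∀ y ∈ l, p y = true → m ≤ y := by
  intro l
  induction l with
  | nil => intro _ m h; simp at h
  | cons a t ih =>
    intro hp m h
    rw [List.pairwise_cons] at hp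
    rw [List.filter_cons] at h
    by_cases hpa : p a
    · rw [if_pos hpa] at h
      simp only [List.head?_cons, Option.some.injEq] at h
      subst h
      refine ⟨by simp, hpa, ?_⟩
      intro y hy _
      rcases List.mem_cons.mp hy with h | h
      · exact le_of_eq h.symm
      · exact hp.1 y h
    · rw [if_neg hpa] at h
      obtain ⟨hm, hpm, hmin⟩ := ih hp.2 m h
      refine ⟨List.mem_cons_of_mem _ hm, hpm, ?_⟩
      intro y hy hpy
      rcases List.mem_cons.mp hy with h | h
      · exact absurd (h ▸ hpy) hpa
      · exact hmin y h hpy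

lemma head?_filter_eq_of_sorted (l1 l2 : List String) (p : String → Bool)
    (h1 : l1.Pairwise (· ≤ ·)) (h2 : l2.Pairwise (· ≤ ·))
    (hm : ∀ x, x ∈ l1 ↔ x ∈ l2) :
    (l1.filter p).head? = (l2.filter p).head? := by
  rcases e1 : (l1.filter p).head? with _ | m1 <;> rcases e2 : (l2.filter p).head? with _ | m2
  · rfl
  · obtain ⟨hmem, hp2, _⟩ := head?_filter_min p l2 h2 m2 e2
    have hnil : l1.filter p = [] := List.head?_eq_none_iff.mp e1
    exact absurd hp2 (List.filter_eq_nil_iff.mp hnil m2 ((hm m2).mpr hmem))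
  · obtain ⟨hmem, hp1, _⟩ := head?_filter_min p l1 h1 m1 e1
    have hnil : l2.filter p = [] := List.head?_eq_none_iff.mp e2
    exact absurd hp1 (List.filter_eq_nil_iff.mp hnil m1 ((hm m1).mp hmem))
  · obtain ⟨ha1, hp1, hmin1⟩ := head?_filter_min p l1 h1 m1 e1
    obtain ⟨ha2, hp2, hmin2⟩ := head?_filter_min p l2 h2 m2 e2
    rw [le_antisymm (hmin1 m2 ((hm m2).mpr ha2) hp2) (hmin2 m1 ((hm m1).mp ha1) hp1)]

lemma sum_counts (V : List String) :
    ((PySem.Set.ofList V).map (fun x => (V.count x : Int))).sum = (V.length : Int) := by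
  have hperm : (PySem.Set.ofList V).Perm V.dedup :=
    (List.perm_ext_iff_of_nodup (PySem.Set.nodup_ofList V) V.nodup_dedup).mpr
      (fun a => by rw [PySem.Set.mem_ofList, List.mem_dedup])
  have hnat : ((PySem.Set.ofList V).map (fun x => V.count x)).sum = V.length := by
    rw [(hperm.map (fun x => V.count x)).sum_eq]
    exact List.sum_map_count_dedup_eq_length V
  have hcast : ((PySem.Set.ofList V).map (fun x => (V.count x : Int))).sum
      = (((PySem.Set.ofList V).map (fun x => V.count x)).sum : Int) := by
    rw [Nat.cast_list_sum, List.map_map]; rfl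
  rw [hcast, hnat]

lemma nodup_keys_modify (d : PySem.Dict String Int) (c : String) (f : Int → Int)
    (h : d.keys.Nodup) : (d.modify c 0 f).keys.Nodup := by
  rw [PySem.Dict.keys_modify]
  by_cases hc : d.contains c
  · rw [PySem.Dict.keys_insert_of_contains _ _ hc]
    exact h
  · rw [PySem.Dict.keys_insert_of_not_contains _ _ (by simpa using hc)]
    rw [List.nodup_append]
    refine ⟨h, List.nodup_singleton c, ?_⟩
    intro a ha b hb
    rw [List.mem_singleton] at hb
    have hcm : c ∉ d.keys := by rwa [PySem.Dict.contains_iff_mem_keys] at hc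
    intro he
    exact hcm (by rw [← hb, ← he]; exact ha)

lemma values_sum_modify_add_one (u : PySem.Dict String Int) (c : String)
    (hnd : u.keys.Nodup) :
    (u.modify c 0 (· + 1)).values.sum = u.values.sum + 1 := by
  have hkeys := PySem.Dict.keys_modify u c 0 (· + 1)
  by_cases hc : u.contains c
  · have hk2 : (u.modify c 0 (· + 1)).keys = u.keys := by
      rw [hkeys, PySem.Dict.keys_insert_of_contains _ _ hc]
    rw [PySem.Dict.values_eq_map_keys _ (by rw [hk2]; exact hnd) 0,
        PySem.Dict.values_eq_map_keys _ hnd 0, hk2]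
    exact sum_map_update c (fun k => u.getD k 0) (fun k => (u.modify c 0 (· + 1)).getD k 0) 1
      (by simp [PySem.Dict.getD_modify_self]) u.keys hnd
      ((PySem.Dict.contains_iff_mem_keys u c).mp hc)
      (fun x _ hxc => by simp [PySem.Dict.getD_modify, hxc])
  · have hcm : c ∉ u.keys := by rwa [PySem.Dict.contains_iff_mem_keys] at hc
    have hk2 : (u.modify c 0 (· + 1)).keys = u.keys ++ [c] := by
      rw [hkeys, PySem.Dict.keys_insert_of_not_contains _ _ (by simpa using hc)]
    have hnd2 : (u.modify c 0 (· + 1)).keys.Nodup := nodup_keys_modify u c (· + 1) hnd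
    rw [PySem.Dict.values_eq_map_keys _ hnd2 0, PySem.Dict.values_eq_map_keys _ hnd 0, hk2]
    rw [List.map_append, List.sum_append]
    have h1 : u.keys.map (fun k => (u.modify c 0 (· + 1)).getD k 0)
        = u.keys.map (fun k => u.getD k 0) := by
      refine List.map_congr_left fun x hx => ?_
      have hxc : x ≠ c := fun he => hcm (he ▸ hx)
      simp [PySem.Dict.getD_modify, hxc]
    have h2 : (u.modify c 0 (· + 1)).getD c 0 = 1 := by
      rw [PySem.Dict.getD_modify_self, PySem.Dict.getD_of_not_contains _ _ (by simpa using hc)]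
      norm_num
    simp [h1, h2]

lemma ih_invs (V : List String) (seq : List String) (c : String)
    (usados remaining : PySem.Dict String Int)
    (h1 : ∀ x, remaining.getD x 0 = (V.count x : Int) - usados.getD x 0)
    (h2 : usados.values.sum = (seq.length : Int))
    (h7 : ∀ x, 0 ≤ remaining.getD x 0)
    (h8 : ∀ x, 0 ≤ usados.getD x 0)
    (h9 : ((PySem.Set.ofList V).map (fun x => remaining.getD x 0)).sum
        = (V.length : Int) - (seq.length : Int))
    (h13 : usados.keys.Nodup)
    (hc : 0 < remaining.getD c 0) :
    (∀ x, (remaining.modify c 0 (· - 1)).getD x 0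
        = (V.count x : Int) - (usados.modify c 0 (· + 1)).getD x 0)
    ∧ (usados.modify c 0 (· + 1)).values.sum = (((seq ++ [c]).length : Nat) : Int)
    ∧ (∀ x, 0 ≤ (remaining.modify c 0 (· - 1)).getD x 0)
    ∧ (∀ x, 0 ≤ (usados.modify c 0 (· + 1)).getD x 0)
    ∧ ((PySem.Set.ofList V).map (fun x => (remaining.modify c 0 (· - 1)).getD x 0)).sum
        = (V.length : Int) - (((seq ++ [c]).length : Nat) : Int)
    ∧ (usados.modify c 0 (· + 1)).keys.Nodup
    ∧ c ∈ V := by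
  have hcV : c ∈ V := by
    have hx := h1 c
    have hy := h8 c
    have : 0 < (V.count c : Int) := by omega
    exact List.count_pos_iff.mp (by exact_mod_cast this)
  have hlen : ((seq ++ [c]).length : Int) = (seq.length : Int) + 1 := by
    rw [List.length_append, List.length_singleton]; push_cast; ring
  refine ⟨?_, ?_, ?_, ?_, ?_, nodup_keys_modify usados c (· + 1) h13, hcV⟩
  · intro x
    rw [PySem.Dict.getD_modify, PySem.Dict.getD_modify]
    split_ifs with hx
    · subst hx; have := h1 x; omega
    · exact h1 x
  · rw [values_sum_modify_add_one usados c h13, h2, hlen]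
  · intro x
    rw [PySem.Dict.getD_modify]
    split_ifs with hx
    · subst hx; omega
    · exact h7 x
  · intro x
    rw [PySem.Dict.getD_modify]
    split_ifs with hx
    · subst hx; have := h8 x; omega
    · exact h8 x
  · rw [sum_map_update c (fun x => remaining.getD x 0)
        (fun x => (remaining.modify c 0 (· - 1)).getD x 0) (-1)
        (by simp [PySem.Dict.getD_modify_self]; ring)
        (PySem.Set.ofList V) (PySem.Set.nodup_ofList V) ((PySem.Set.mem_ofList V c).mpr hcV)
        (fun x _ hxc => by simp [PySem.Dict.getD_modify, hxc]),
      h9, hlen]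
    ring

lemma loop_eq (V : List String) :
    ∀ (fuelA fuelB : Nat) (seq : List String) (cur : String)
      (usados remaining : PySem.Dict String Int) (pre disp : List String),
      (∀ x, remaining.getD x 0 = (V.count x : Int) - usados.getD x 0) →
      usados.values.sum = (seq.length : Int) →
      seq.getLast? = some cur →
      cur ∈ V →
      sKeys V = pre ++ disp →
      (∀ x ∈ pre, remaining.getD x 0 = 0) →
      (∀ x, 0 ≤ remaining.getD x 0) →
      (∀ x, 0 ≤ usados.getD x 0) →
      ((PySem.Set.ofList V).map (fun x => remaining.getD x 0)).sum
        = (V.length : Int) - (seq.length : Int) →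
      seq.length ≤ V.length →
      fuelB = V.length - seq.length →
      fuelB ≤ fuelA →
      usados.keys.Nodup →
      aLoop V (PySem.Dict.counter V) (mapaOf V) seq usados fuelA
        = bLoop remaining disp cur seq fuelB := by
  intro fuelA
  induction fuelA with
  | zero =>
    intro fuelB seq cur usados remaining pre disp _ _ _ _ _ _ _ _ _ _ _ hle _
    have h0 : fuelB = 0 := Nat.le_zero.mp hle
    subst h0
    rfl
  | succ fA ih =>
    intro fuelB seq cur usados remaining pre disp h1 h2 h3 h4 h5 h6 h7 h8 h9 h10 h11 h12 h13
    by_cases hlen : seq.length < V.length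
    · -- A's while condition holds; one more element is placed
      have hfB : fuelB ≠ 0 := by omega
      obtain ⟨m, rfl⟩ := Nat.exists_eq_succ_of_ne_zero hfB
      have hcondA : usados.values.sum < (V.length : Int) := by
        rw [h2]; exact_mod_cast hlen
      rw [aLoop, if_pos hcondA, PySem.List.pyGet?_neg_one, h3]
      simp only []
      rw [get?_mapaOf V cur h4]
      simp only []
      rw [bLoop]
      have hiff : (usados.getD (pyRev cur) 0 < (PySem.Dict.counter V).getD (pyRev cur) 0)
          ↔ (0 < remaining.getD (pyRev cur) 0) := by
        rw [PySem.Dict.getD_counter]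
        have := h1 (pyRev cur)
        omega
      by_cases hch : pyRev cur ≠ "" ∧ 0 < remaining.getD (pyRev cur) 0
      · -- chain step
        rw [if_pos ⟨hch.1, hiff.mpr hch.2⟩, if_pos hch]
        obtain ⟨i1, i2, i7, i8, i9, i13, icV⟩ :=
          ih_invs V seq (pyRev cur) usados remaining h1 h2 h7 h8 h9 h13 hch.2
        refine ih m (seq ++ [pyRev cur]) (pyRev cur) _ _ pre disp i1 i2
          List.getLast?_concat icV h5 ?_ i7 i8 i9 ?_ ?_ ?_ i13
        · intro x hx
          have hx0 := h6 x hx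
          have hpos := hch.2
          rw [PySem.Dict.getD_modify, if_neg (fun he => by rw [he] at hx0; omega)]
          exact hx0
        · simp only [List.length_append, List.length_singleton]
          omega
        · simp only [List.length_append, List.length_singleton]
          omega
        · omega
      · -- fallback step: smallest still-available value
        rw [if_neg (fun hcontra => hch ⟨hcontra.1, hiff.mp hcontra.2⟩), if_neg hch]
        have hApred : (fun num => decide (usados.getD num 0 < (PySem.Dict.counter V).getD num 0))
            = (fun x => decide (0 < remaining.getD x 0)) := by
          funext x
          rw [PySem.Dict.getD_counter]
          exact decide_eq_decide.mpr (by have := h1 x; omega)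
        have hBpred : (fun x => remaining.getD x 0 == 0)
            = (fun x => !(decide (0 < remaining.getD x 0))) := by
          funext x
          have h7x := h7 x
          by_cases hx : remaining.getD x 0 = 0
          · simp [hx]
          · have hpos : 0 < remaining.getD x 0 := by omega
            simp [hx, hpos]
        have hhead : ((PySem.List.sorted V (fun x => x)).filter
              (fun x => decide (0 < remaining.getD x 0))).head?
            = (disp.dropWhile (fun x => remaining.getD x 0 == 0)).head? := by
          rw [hBpred, ← head?_filter_eq_dropWhile]
          have e1 := head?_filter_eq_of_sorted (PySem.List.sorted V (fun x => x)) (sKeys V)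
            (fun x => decide (0 < remaining.getD x 0))
            (PySem.List.sorted_pairwise V (fun x => x))
            (PySem.List.sorted_pairwise (PySem.Set.ofList V) (fun x => x))
            (fun x => by
              rw [sKeys, PySem.List.mem_sorted, PySem.List.mem_sorted, PySem.Set.mem_ofList])
          rw [e1, h5, List.filter_append,
            (List.filter_eq_nil_iff (p := fun x => decide (0 < remaining.getD x 0))
              (l := pre)).mpr (fun a ha => by simp [h6 a ha]),
            List.nil_append]
        rw [hApred]
        rcases edrop : disp.dropWhile (fun x => remaining.getD x 0 == 0) with _ | ⟨c, rest⟩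
        · -- both sides find nothing (cannot happen, but the programs agree anyway)
          rw [edrop] at hhead
          have hfn : (PySem.List.sorted V (fun x => x)).filter
              (fun x => decide (0 < remaining.getD x 0)) = [] :=
            List.head?_eq_none_iff.mp (by rw [hhead]; rfl)
          rw [hfn]
        · rw [edrop] at hhead
          rcases ecand : (PySem.List.sorted V (fun x => x)).filter
              (fun x => decide (0 < remaining.getD x 0)) with _ | ⟨c2, cs⟩
          · rw [ecand] at hhead; simp at hhead
          · rw [ecand] at hhead
            simp only [List.head?_cons, Option.some.injEq] at hhead
            rw [hhead] at ecand
            rw [hhead]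
            have hqc : 0 < remaining.getD c 0 := by
              have : c ∈ (PySem.List.sorted V (fun x => x)).filter
                  (fun x => decide (0 < remaining.getD x 0)) := by
                rw [ecand]; simp
              have := List.of_mem_filter this
              simpa using this
            obtain ⟨i1, i2, i7, i8, i9, i13, icV⟩ :=
              ih_invs V seq c usados remaining h1 h2 h7 h8 h9 h13 hqc
            refine ih m (seq ++ [c]) c _ _
              (pre ++ disp.takeWhile (fun x => remaining.getD x 0 == 0)) (c :: rest)
              i1 i2 List.getLast?_concat icV ?_ ?_ i7 i8 i9 ?_ ?_ ?_ i13
            · rw [h5, List.append_assoc]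
              congr 1
              rw [← edrop, List.takeWhile_append_dropWhile]
            · intro x hx
              have hx0 : remaining.getD x 0 = 0 := by
                rcases List.mem_append.mp hx with h | h
                · exact h6 x h
                · have := List.mem_takeWhile_imp h
                  simpa using this
              rw [PySem.Dict.getD_modify, if_neg (fun he => by rw [he] at hx0; omega)]
              exact hx0
            · simp only [List.length_append, List.length_singleton]
              omega
            · simp only [List.length_append, List.length_singleton]
              omega
            · omega
    · -- all elements placed: both loops stop
      have hEq : seq.length = V.length := le_antisymm h10 (not_lt.mp hlen)
      have hfB : fuelB = 0 := by omega
      subst hfB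
      rw [aLoop, if_neg (by rw [h2]; exact_mod_cast not_lt.mpr (le_of_eq hEq.symm))]
      rfl

-- ===== VERDICT (by name: the statement is the Claim_ definition above) =====
theorem reconstruir_sequencia_spec : Claim_equal_reconstruir_sequencia := by
  unfold Claim_equal_reconstruir_sequencia
  intro V _hdom
  unfold Spec_reconstruir_sequencia
  by_cases hV : V = []
  · subst hV; rfl
  · unfold reconstruir_sequencia reconstruir_sequencia_alt
    rw [if_neg hV, if_neg hV]
    simp only [PySem.Dict.foldl_insert_getD_add_one_eq_counter, PySem.Dict.keys_counter]
    rcases hmin : PySem.List.min? V (fun x => x) with _ | inicio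
    · exact absurd ((PySem.List.min?_eq_none_iff V _).mp hmin) hV
    rcases hS : PySem.List.sorted (PySem.Set.ofList V) (fun x => x) with _ | ⟨c, rest⟩
    · exfalso
      have hof : PySem.Set.ofList V = [] := (PySem.List.sorted_eq_nil_iff _ _ _).mp hS
      rcases List.exists_cons_of_ne_nil hV with ⟨a, t, hVeq⟩
      have ha : a ∈ PySem.Set.ofList V := (PySem.Set.mem_ofList _ a).mpr (by rw [hVeq]; simp)
      rw [hof] at ha
      simp at ha
    have hcV : c ∈ V := (PySem.Set.mem_ofList V c).mp
      ((PySem.List.mem_sorted _ _ _ c).mp (by rw [hS]; simp))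
    have hci : c = inicio := le_antisymm
      (PySem.List.key_head_sorted_le _ _ hS inicio
        ((PySem.Set.mem_ofList V _).mpr (PySem.List.min?_mem hmin)))
      (PySem.List.min?_isMin hmin c hcV)
    subst hci
    simp only []
    have hlenV : 0 < V.length := List.length_pos_of_ne_nil hV
    refine loop_eq V V.length (V.length - 1) [c] c (PySem.Dict.counter [c])
      ((PySem.Dict.counter V).modify c 0 (· - 1)) [] (c :: rest)
      ?_ ?_ (by simp) hcV (by rw [sKeys, hS]; rfl) (by simp) ?_ ?_ ?_ (by simpa using hlenV) (by simp) (by omega)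
      (PySem.Dict.nodup_keys_counter [c])
    · intro x
      simp only [PySem.Dict.getD_modify, PySem.Dict.getD_counter]
      split_ifs with hx
      · subst hx
        have h2 : 0 < V.count x := List.count_pos_iff.mpr hcV
        simp
      · have hx' : c ≠ x := fun he => hx he.symm
        simp [hx']
    · have hkeys : (PySem.Dict.counter [c]).keys = [c] := by
        rw [PySem.Dict.keys_counter]
        exact PySem.Set.ofList_eq_self_of_nodup _ (List.nodup_singleton c)
      rw [PySem.Dict.values_eq_map_keys _ (PySem.Dict.nodup_keys_counter [c]) 0, hkeys]
      simp [PySem.Dict.getD_counter]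
    · intro x
      simp only [PySem.Dict.getD_modify, PySem.Dict.getD_counter]
      split_ifs with hx
      · subst hx
        have : 0 < V.count x := List.count_pos_iff.mpr hcV
        omega
      · omega
    · intro x
      rw [PySem.Dict.getD_counter]
      omega
    · rw [sum_map_update c (fun x => (PySem.Dict.counter V).getD x 0)
          (fun x => ((PySem.Dict.counter V).modify c 0 (· - 1)).getD x 0) (-1)
          (by simp [PySem.Dict.getD_modify_self]; ring)
          (PySem.Set.ofList V) (PySem.Set.nodup_ofList V)
          ((PySem.Set.mem_ofList V c).mpr hcV)
          (fun x _ hxc => by simp [PySem.Dict.getD_modify, hxc])]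
      have : ((PySem.Set.ofList V).map (fun x => (PySem.Dict.counter V).getD x 0)).sum
          = (V.length : Int) := by
        rw [List.map_congr_left (fun x _ => PySem.Dict.getD_counter V x)]
        exact sum_counts V
      rw [this]
      simp only [List.length_singleton]
      push_cast
      ring
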